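-- pv_equiv track=rewrite | github.com/charlie-j/symbolic-hash-models | Tamarin-Case-Studies/Concatenation/auto_paper.py | apply_redundancy
-- ===== SOURCE A (Python) =====
-- redundancy = {
--     "CP" : ["Ex"],  # ("CP" => "Ex")
--     "IP": ["Ex"],   # ("IP" => "Ex")
--     "ACT" : ["Adv"], #  ("ACT" => "Adv")
--     "ACN" : ["Adv"], #  ("ACN" => "Adv")
--     "i" : ["Adv"],
--     "AllCol" : ["CP", "IP", "PI1", "PI2", "Ex", "Clo"], # ("AllCol" => all colisions...), and we say that AllCol has priority over CR
--     }
--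
-- def apply_redundancy(scen):
--     res = list(scen)
--     for key in redundancy:
--         if key in res:
--             for dropped in redundancy[key]:
--                 try:
--                     res.remove(dropped)
--                 except: ()
--     res.sort()
--     return res
-- ===== SOURCE B (Python) =====
-- redundancy = {
--     "CP" : ["Ex"],
--     "IP": ["Ex"],
--     "ACT" : ["Adv"],
--     "ACN" : ["Adv"],
--     "i" : ["Adv"],
--     "AllCol" : ["CP", "IP", "PI1", "PI2", "Ex", "Clo"],
--     }
--
-- def apply_redundancy(scen):
--     # one scan of the redundancy table to build a per-value removal budget,
--     # then one pass over scen dropping the first budget[v] occurrences of each v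
--     budget = {}
--     for key, drops in redundancy.items():
--         if key in scen:
--             for d in drops:
--                 budget[d] = budget.get(d, 0) + 1
--     out = []
--     for x in scen:
--         if budget.get(x, 0) > 0:
--             budget[x] = budget[x] - 1
--         else:
--             out.append(x)
--     return sorted(out)
-- ===== Notes on version B (the rewrite author's own statement) =====
-- stated objective: alternative
-- what changed: Instead of repeatedly calling list.remove inside the key loop (with try/except), B scans the redundancy table once to build a per-value removal budget dict and then drops elements in a single pass over the list before sorting.
import Mathlib
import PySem

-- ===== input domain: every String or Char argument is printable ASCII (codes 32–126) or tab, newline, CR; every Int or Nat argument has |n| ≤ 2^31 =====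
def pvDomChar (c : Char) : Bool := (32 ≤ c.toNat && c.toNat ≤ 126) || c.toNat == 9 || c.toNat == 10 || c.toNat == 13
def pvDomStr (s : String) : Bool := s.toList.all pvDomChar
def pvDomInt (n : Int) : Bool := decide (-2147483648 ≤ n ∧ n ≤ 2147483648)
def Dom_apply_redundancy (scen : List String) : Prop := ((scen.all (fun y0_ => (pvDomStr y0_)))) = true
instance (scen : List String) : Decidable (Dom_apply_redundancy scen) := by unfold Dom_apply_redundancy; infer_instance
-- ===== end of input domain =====

-- B replaces A's repeated list.remove calls by one budget-building scan of the redundancy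
-- table followed by a single filtering pass over the list (objective: alternative decomposition).
-- A sorts its local copy in place; the original argument is never mutated by either version.

-- ===== PORT A =====
def pvRedundancy : List (String × List String) :=
  [("CP", ["Ex"]), ("IP", ["Ex"]), ("ACT", ["Adv"]), ("ACN", ["Adv"]),
   ("i", ["Adv"]), ("AllCol", ["CP", "IP", "PI1", "PI2", "Ex", "Clo"])]

-- res.remove(dropped) inside try/except: remove first occurrence, keep res unchanged on ValueError
def pvRemoveTry (res : List String) (v : String) : List String :=
  match PySem.List.remove? res v with
  | some r => r
  | none => res

def apply_redundancy (scen : List String) : List String :=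
  PySem.List.sorted
    (pvRedundancy.foldl
      (fun res kv => if res.contains kv.1 then kv.2.foldl pvRemoveTry res else res) scen)
    (fun x => x) false

-- ===== PORT B =====
def pvBudget (scen : List String) : PySem.Dict String Int :=
  pvRedundancy.foldl
    (fun d kv => if scen.contains kv.1 then
        kv.2.foldl (fun d v => d.insert v (d.getD v 0 + 1)) d
      else d)
    PySem.Dict.empty

def pvPass : PySem.Dict String Int → List String → List String
  | _, [] => []
  | d, x :: xs =>
    if 0 < d.getD x 0 then pvPass (d.insert x (d.getD x 0 - 1)) xs
    else x :: pvPass d xs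

def apply_redundancy_alt (scen : List String) : List String :=
  PySem.List.sorted (pvPass (pvBudget scen) scen) (fun x => x) false

-- ===== PRECONDITION & SPEC =====
def Spec_apply_redundancy (scen : List String) (out : List String) : Prop := out = apply_redundancy_alt scen
instance (scen : List String) (out : List String) : Decidable (Spec_apply_redundancy scen out) := by unfold Spec_apply_redundancy; infer_instance

-- ===== CLAIM (what is proved, stated in full; the proofs are below) =====
def Claim_equal_apply_redundancy : Prop := ∀ (scen : List String), Dom_apply_redundancy scen → Spec_apply_redundancy scen (apply_redundancy scen)

-- ===== LEMMAS AND PROOFS =====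

-- the list of values A actually tries to remove, in removal order
def pvDropsOf (scen : List String) : List (String × List String) → List String
  | [] => []
  | kv :: items => (if scen.contains kv.1 then kv.2 else []) ++ pvDropsOf scen items

-- abstract budget-driven pass (pvPass with the dict read off as a function)
def pvPassF (b : String → Int) : List String → List String
  | [] => []
  | x :: xs =>
    if 0 < b x then pvPassF (fun w => if w = x then b w - 1 else b w) xs
    else x :: pvPassF b xs

lemma removeTry_nil (v : String) : pvRemoveTry [] v = [] := by
  simp [pvRemoveTry, PySem.List.remove?]

lemma removeTry_cons (x v : String) (l : List String) :
    pvRemoveTry (x :: l) v = if x = v then l else x :: pvRemoveTry l v := by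
  by_cases h : x = v
  · subst h; simp [pvRemoveTry]
  · rw [if_neg h]
    unfold pvRemoveTry
    rw [PySem.List.remove?_cons_of_ne _ h]
    cases PySem.List.remove? l v <;> simp

lemma mem_removeTry_of_ne {k v : String} (h : k ≠ v) (l : List String) :
    (k ∈ pvRemoveTry l v) ↔ k ∈ l := by
  induction l with
  | nil => simp [removeTry_nil]
  | cons x t ih =>
    rw [removeTry_cons]
    by_cases hx : x = v
    · rw [if_pos hx]
      subst hx
      simp [h]
    · rw [if_neg hx]
      simp [ih]

lemma contains_foldl_removeTry (l : List String) (k : String) (h : k ∉ l) :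
    ∀ res : List String, (l.foldl pvRemoveTry res).contains k = res.contains k := by
  induction l with
  | nil => intro res; rfl
  | cons v t ih =>
    intro res
    have hkv : k ≠ v := by intro he; exact h (he ▸ List.mem_cons_self)
    have ht : k ∉ t := fun hm => h (List.mem_cons_of_mem _ hm)
    rw [List.foldl_cons, ih ht]
    simp [List.contains_eq_mem, mem_removeTry_of_ne hkv]

lemma foldl_removeTry_if (c : Bool) (l res : List String) :
    (if c then l.foldl pvRemoveTry res else res) = (if c then l else []).foldl pvRemoveTry res := by
  cases c <;> simp

-- A's loop = folding pvRemoveTry over pvDropsOf, as long as later keys never occur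
-- among earlier dropped values (true of the redundancy table)
lemma foldl_stepA_eq (items : List (String × List String)) (scen : List String)
    (hp : items.Pairwise (fun a b => b.1 ∉ a.2)) :
    ∀ res : List String, (∀ kv ∈ items, res.contains kv.1 = scen.contains kv.1) →
      items.foldl (fun res kv => if res.contains kv.1 then kv.2.foldl pvRemoveTry res else res) res
        = (pvDropsOf scen items).foldl pvRemoveTry res := by
  induction items with
  | nil => intro res _; rfl
  | cons kv rest ih =>
    intro res hres
    rw [List.foldl_cons, pvDropsOf, List.foldl_append]
    rw [hres kv List.mem_cons_self, foldl_removeTry_if]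
    rcases List.pairwise_cons.mp hp with ⟨hhead, htail⟩
    apply ih htail
    intro kv' hkv'
    have hnot : kv'.1 ∉ (if scen.contains kv.1 then kv.2 else []) := by
      cases hc : scen.contains kv.1 <;> simp [hhead kv' hkv']
    rw [contains_foldl_removeTry _ _ hnot]
    exact hres kv' (List.mem_cons_of_mem _ hkv')

-- counting: folding the increment loop adds the list's count to each key's budget
lemma getD_foldl_inc (l : List String) :
    ∀ (d : PySem.Dict String Int) (v : String),
      ((l.foldl (fun d x => d.insert x (d.getD x 0 + 1)) d).getD v 0)
        = d.getD v 0 + (l.count v : Int) := by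
  induction l with
  | nil => intro d v; simp
  | cons x t ih =>
    intro d v
    rw [List.foldl_cons, ih]
    by_cases h : v = x
    · subst h
      rw [PySem.Dict.getD_insert_self]
      simp
      omega
    · rw [PySem.Dict.getD_insert_of_ne _ _ _ h]
      have : x ≠ v := fun he => h he.symm
      simp [this]

lemma getD_foldl_stepB (items : List (String × List String)) (scen : List String) :
    ∀ (d : PySem.Dict String Int) (v : String),
      ((items.foldl
          (fun d kv => if scen.contains kv.1 then
              kv.2.foldl (fun d v => d.insert v (d.getD v 0 + 1)) d
            else d) d).getD v 0)
        = d.getD v 0 + ((pvDropsOf scen items).count v : Int) := by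
  induction items with
  | nil => intro d v; simp [pvDropsOf]
  | cons kv rest ih =>
    intro d v
    rw [List.foldl_cons, ih, pvDropsOf]
    cases hc : scen.contains kv.1
    · simp
    · rw [if_pos rfl, getD_foldl_inc]
      simp [List.count_append]
      omega

lemma getD_budget (scen : List String) (v : String) :
    (pvBudget scen).getD v 0 = ((pvDropsOf scen pvRedundancy).count v : Int) := by
  unfold pvBudget
  rw [getD_foldl_stepB]
  simp

-- pvPass reads its dict only through getD, so it is pvPassF of the getD function
lemma pass_eq_passF : ∀ (xs : List String) (d : PySem.Dict String Int),
    pvPass d xs = pvPassF (fun v => d.getD v 0) xs := by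
  intro xs
  induction xs with
  | nil => intro d; rfl
  | cons x t ih =>
    intro d
    rw [pvPass, pvPassF]
    by_cases h : 0 < d.getD x 0
    · rw [if_pos h, if_pos h, ih]
      congr 1
      funext w
      by_cases hw : w = x
      · subst hw; simp
      · rw [PySem.Dict.getD_insert_of_ne _ _ _ hw, if_neg hw]
    · rw [if_neg h, if_neg h, ih]

lemma passF_nonpos (b : String → Int) (hb : ∀ v, b v ≤ 0) : ∀ xs, pvPassF b xs = xs := by
  intro xs
  induction xs with
  | nil => rfl
  | cons x t ih =>
    rw [pvPassF, if_neg (by have := hb x; omega), ih]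

-- KEY LEMMA: raising v's budget by one removes the first remaining occurrence of v
lemma passF_succ (v : String) : ∀ (xs : List String) (b : String → Int), (∀ w, 0 ≤ b w) →
    pvPassF (fun w => if w = v then b w + 1 else b w) xs = pvRemoveTry (pvPassF b xs) v := by
  intro xs
  induction xs with
  | nil => intro b _; rw [pvPassF, pvPassF, removeTry_nil]
  | cons x t ih =>
    intro b hb
    by_cases hxv : x = v
    · subst hxv
      rw [pvPassF, if_pos (by simp; have := hb x; omega)]
      have hfn : (fun w => if w = x then (if w = x then b w + 1 else b w) - 1 else (if w = x then b w + 1 else b w)) = b := by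
        funext w; by_cases hw : w = x <;> simp [hw]
      rw [hfn, pvPassF]
      by_cases h : 0 < b x
      · rw [if_pos h]
        have hb' : ∀ w, 0 ≤ (fun w => if w = x then b w - 1 else b w) w := by
          intro w; by_cases hw : w = x <;> simp [hw] <;> [omega; exact hb w]
        rw [← ih _ hb']
        congr 1
        funext w
        by_cases hw : w = x <;> simp [hw]
      · rw [if_neg h, removeTry_cons, if_pos rfl]
    · rw [pvPassF, pvPassF]
      simp only [if_neg hxv]
      by_cases h : 0 < b x
      · rw [if_pos h, if_pos h]
        have hfn : (fun w => if w = x then (if w = v then b w + 1 else b w) - 1 else (if w = v then b w + 1 else b w))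
            = (fun w => if w = v then (fun u => if u = x then b u - 1 else b u) w + 1 else (fun u => if u = x then b u - 1 else b u) w) := by
          funext w
          by_cases hw : w = x
          · subst hw; simp [hxv]
          · by_cases hwv : w = v
            · subst hwv
              simp [hw]
            · simp [hw, hwv]
        rw [hfn]
        have hb' : ∀ w, 0 ≤ (fun u => if u = x then b u - 1 else b u) w := by
          intro w; by_cases hw : w = x <;> simp [hw] <;> [omega; exact hb w]
        exact ih _ hb'
      · rw [if_neg h, if_neg h, removeTry_cons, if_neg hxv, ih b hb]

-- the removal fold is the budget pass with the count budget
lemma foldl_removeTry_eq_passF (l : List String) :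
    ∀ xs : List String, l.foldl pvRemoveTry xs = pvPassF (fun v => (l.count v : Int)) xs := by
  induction l using List.reverseRecOn with
  | nil =>
    intro xs
    rw [List.foldl_nil, passF_nonpos _ (by intro v; simp)]
  | append_singleton l v ih =>
    intro xs
    rw [List.foldl_append, List.foldl_cons, List.foldl_nil, ih]
    rw [← passF_succ v xs (fun w => (l.count w : Int)) (by intro w; positivity)]
    congr 1
    funext w
    by_cases hw : w = v
    · subst hw
      simp [List.count_append]
    · simp [List.count_append, hw, List.count_singleton']
      have : v ≠ w := fun he => hw he.symm
      simp [this]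

-- ===== VERDICT (by name: the statement is the Claim_ definition above) =====
theorem apply_redundancy_spec : Claim_equal_apply_redundancy := by
  intro scen _
  unfold Spec_apply_redundancy apply_redundancy apply_redundancy_alt
  congr 1
  rw [foldl_stepA_eq pvRedundancy scen (by decide) scen (fun kv _ => rfl)]
  rw [foldl_removeTry_eq_passF]
  rw [pass_eq_passF]
  congr 1
  funext v
  exact (getD_budget scen v).symm
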